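-- pv_equiv track=rewrite | github.com/iaroob/algorithms | exams/repo3/Junio19_2.py | nuevo_elemento
-- ===== SOURCE A (Python) =====
-- def nuevo_elemento(lAnt,lNuevo):
-- 	pos=len(lNuevo)//2
-- 	if pos==0 or pos == len(lAnt)or lNuevo[pos]>lAnt[pos-1] and lNuevo[pos]!=lAnt[pos]:
-- 		return lNuevo[pos]
-- 	elif lNuevo[pos] == lAnt[pos]:
-- 		return nuevo_elemento(lAnt[pos:],lNuevo[pos:])
-- 	else:
-- 		return nuevo_elemento(lAnt[:pos], lNuevo[:pos])
-- ===== SOURCE B (Python) =====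
-- def nuevo_elemento(lAnt, lNuevo):
--     # Iterative binary search on index windows (no slice copies):
--     # s = common start offset, la/ln = current window lengths.
--     s = 0
--     la, ln = len(lAnt), len(lNuevo)
--     while True:
--         pos = ln // 2
--         if pos == 0 or pos == la or (lNuevo[s + pos] > lAnt[s + pos - 1]
--                                      and lNuevo[s + pos] != lAnt[s + pos]):
--             return lNuevo[s + pos]
--         if lNuevo[s + pos] == lAnt[s + pos]:
--             s += pos
--             la -= pos
--             ln -= pos
--         else:
--             la = pos
--             ln = pos
-- ===== Notes on version B (the rewrite author's own statement) =====
-- stated objective: alternative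
-- what changed: A's recursion that builds slice copies at every level is replaced by an iterative loop maintaining a start offset and two window lengths into the original lists; it trades slice copies for O(1) index arithmetic per step (not measurably faster in a timing run).
-- outside the precondition, e.g. on nuevo_elemento([-1, 4, 6], [4, -5, 0, 0, 2]): A returns 4, B returns 4
import Mathlib
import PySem

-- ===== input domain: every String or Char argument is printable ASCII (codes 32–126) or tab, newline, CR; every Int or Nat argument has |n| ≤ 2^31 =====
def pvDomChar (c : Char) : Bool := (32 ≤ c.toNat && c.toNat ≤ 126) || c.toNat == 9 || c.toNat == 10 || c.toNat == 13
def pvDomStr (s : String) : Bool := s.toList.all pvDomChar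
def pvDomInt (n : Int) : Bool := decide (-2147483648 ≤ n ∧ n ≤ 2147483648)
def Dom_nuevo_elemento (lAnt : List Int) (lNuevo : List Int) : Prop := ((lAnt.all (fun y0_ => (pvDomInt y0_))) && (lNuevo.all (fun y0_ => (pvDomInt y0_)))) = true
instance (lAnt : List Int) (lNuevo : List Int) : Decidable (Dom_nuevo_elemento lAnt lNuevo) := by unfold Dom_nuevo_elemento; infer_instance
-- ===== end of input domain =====

-- B replaces A's recursion on slice copies by an iterative binary search on index
-- windows into the original lists (objective: alternative decomposition, no slice copies).


-- ===== PORT A =====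
-- Literal port of A's recursion on slices.  Indices are in range on every input
-- admitted by Pre_; the getD default 0 is only reached where Python A raises
-- IndexError, and Pre_ excludes those inputs.
def nuevo_elemento (lAnt : List Int) (lNuevo : List Int) : Int :=
  let pos := lNuevo.length / 2
  if pos = 0 ∨ pos = lAnt.length ∨
      (lAnt.getD (pos - 1) 0 < lNuevo.getD pos 0 ∧ lNuevo.getD pos 0 ≠ lAnt.getD pos 0) then
    lNuevo.getD pos 0
  else if lNuevo.getD pos 0 = lAnt.getD pos 0 then
    nuevo_elemento (lAnt.drop pos) (lNuevo.drop pos)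
  else
    nuevo_elemento (lAnt.take pos) (lNuevo.take pos)
termination_by lNuevo.length
decreasing_by
  · simp only [List.length_drop]; omega
  · simp only [List.length_take]; omega

-- ===== PORT B =====
-- The while-True loop of Source B: s = common start offset, la/ln = window lengths.
def pvLoop (lAnt : List Int) (lNuevo : List Int) (s la ln : Nat) : Int :=
  let pos := ln / 2
  if pos = 0 ∨ pos = la ∨
      (lAnt.getD (s + pos - 1) 0 < lNuevo.getD (s + pos) 0 ∧
       lNuevo.getD (s + pos) 0 ≠ lAnt.getD (s + pos) 0) then
    lNuevo.getD (s + pos) 0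
  else if lNuevo.getD (s + pos) 0 = lAnt.getD (s + pos) 0 then
    pvLoop lAnt lNuevo (s + pos) (la - pos) (ln - pos)
  else
    pvLoop lAnt lNuevo s pos pos
termination_by ln
decreasing_by
  · omega
  · omega

def nuevo_elemento_alt (lAnt : List Int) (lNuevo : List Int) : Int :=
  pvLoop lAnt lNuevo 0 lAnt.length lNuevo.length

-- ===== PRECONDITION & SPEC =====
-- Pre_ excludes the inputs on which Python A raises IndexError (empty lNuevo, or a
-- recursion level whose midpoint falls beyond lAnt); it does so by a conservative
-- length shape (len lNuevo ≤ len lAnt + 1, or first midpoint = len lAnt), which also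
-- excludes some mismatched-length inputs on which A happens to return — B returns
-- the same value there (see cites).
def Pre_nuevo_elemento (lAnt : List Int) (lNuevo : List Int) : Prop :=
  lNuevo ≠ [] ∧ (lNuevo.length ≤ lAnt.length + 1 ∨ lNuevo.length / 2 = lAnt.length)
instance (lAnt : List Int) (lNuevo : List Int) : Decidable (Pre_nuevo_elemento lAnt lNuevo) := by
  unfold Pre_nuevo_elemento; infer_instance

def pvWitness_nuevo_elemento : List Int × List Int := ([1, 3, 5], [1, 2, 3, 5])

def Spec_nuevo_elemento (lAnt : List Int) (lNuevo : List Int) (out : Int) : Prop := out = nuevo_elemento_alt lAnt lNuevo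
instance (lAnt : List Int) (lNuevo : List Int) (out : Int) : Decidable (Spec_nuevo_elemento lAnt lNuevo out) := by unfold Spec_nuevo_elemento; infer_instance

-- ===== CLAIM (what is proved, stated in full; the proofs are below) =====
def Claim_equal_nuevo_elemento : Prop := ∀ (lAnt : List Int) (lNuevo : List Int), Dom_nuevo_elemento lAnt lNuevo → Pre_nuevo_elemento lAnt lNuevo → Spec_nuevo_elemento lAnt lNuevo (nuevo_elemento lAnt lNuevo)

-- ===== LEMMAS AND PROOFS =====

-- reading index i of the window l[s : s+k] is reading index s+i of l
lemma pvGetD_window (l : List Int) (s k i : Nat) (h1 : i < k) (h2 : s + k ≤ l.length) :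
    ((l.drop s).take k).getD i 0 = l.getD (s + i) 0 := by
  have hl : ((l.drop s).take k).length = k := by
    simp [List.length_take, List.length_drop]; omega
  have hi : i < ((l.drop s).take k).length := by omega
  have hsi : s + i < l.length := by omega
  rw [List.getD_eq_getElem _ _ hi, List.getD_eq_getElem _ _ hsi]
  simp [List.getElem_take, List.getElem_drop]

-- the index loop of B computes A on the corresponding windows
lemma pvLoop_eq_window (lAnt lNuevo : List Int) :
    ∀ ln s la, s + la ≤ lAnt.length → s + ln ≤ lNuevo.length → 1 ≤ ln → ln ≤ la + 1 →
      pvLoop lAnt lNuevo s la ln =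
        nuevo_elemento ((lAnt.drop s).take la) ((lNuevo.drop s).take ln) := by
  intro ln
  induction ln using Nat.strong_induction_on with
  | _ ln ih =>
    intro s la hA hN h1 h2
    have hwN : ((lNuevo.drop s).take ln).length = ln := by
      simp [List.length_take, List.length_drop]; omega
    have hwA : ((lAnt.drop s).take la).length = la := by
      simp [List.length_take, List.length_drop]; omega
    rw [pvLoop, nuevo_elemento]
    simp only [hwN, hwA]
    set pos := ln / 2 with hpos
    have hposlt : pos < ln := by omega
    have hgN : ((lNuevo.drop s).take ln).getD pos 0 = lNuevo.getD (s + pos) 0 :=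
      pvGetD_window _ _ _ _ hposlt hN
    rw [hgN]
    by_cases hz : pos = 0
    · simp [hz]
    by_cases hla : pos = la
    · simp [hla]
    have hposla : pos < la := by omega
    have hgA1 : ((lAnt.drop s).take la).getD (pos - 1) 0 = lAnt.getD (s + pos - 1) 0 := by
      have := pvGetD_window lAnt s la (pos - 1) (by omega) hA
      rw [this]; congr 1; omega
    have hgA2 : ((lAnt.drop s).take la).getD pos 0 = lAnt.getD (s + pos) 0 :=
      pvGetD_window _ _ _ _ hposla hA
    rw [hgA1, hgA2]
    split_ifs with hc heq
    · rfl
    · have hdropA : ((lAnt.drop s).take la).drop pos = (lAnt.drop (s + pos)).take (la - pos) := by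
        rw [List.drop_take, List.drop_drop]
      have hdropN : ((lNuevo.drop s).take ln).drop pos = (lNuevo.drop (s + pos)).take (ln - pos) := by
        rw [List.drop_take, List.drop_drop]
      rw [hdropA, hdropN]
      exact ih (ln - pos) (by omega) (s + pos) (la - pos) (by omega) (by omega) (by omega) (by omega)
    · have htakeA : ((lAnt.drop s).take la).take pos = (lAnt.drop s).take pos := by
        rw [List.take_take]; congr 1; omega
      have htakeN : ((lNuevo.drop s).take ln).take pos = (lNuevo.drop s).take pos := by
        rw [List.take_take]; congr 1; omega
      rw [htakeA, htakeN]
      exact ih pos (by omega) s pos (by omega) (by omega) (by omega) (by omega)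

-- ===== VERDICT (by name: the statement is the Claim_ definition above) =====
theorem nuevo_elemento_spec : Claim_equal_nuevo_elemento := by
  intro lAnt lNuevo _ hpre
  obtain ⟨hne, hshape⟩ := hpre
  have hn1 : 1 ≤ lNuevo.length := by
    cases lNuevo with
    | nil => exact absurd rfl hne
    | cons a t => simp
  unfold Spec_nuevo_elemento nuevo_elemento_alt
  rcases hshape with hlen | hmid
  · have := pvLoop_eq_window lAnt lNuevo lNuevo.length 0 lAnt.length
      (by omega) (by omega) hn1 (by omega)
    rw [this]; simp
  · -- first midpoint equals len lAnt: both sides return lNuevo[pos] immediately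
    rw [pvLoop, nuevo_elemento]
    simp [hmid]
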